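-- pv_equiv track=rewrite | github.com/nix6839/algorithm-solving | 이취코 with 파이썬/a_greedy/a_greedy/f_reverse_string.py | f_reverse_string
-- ===== SOURCE A (Python) =====
-- def f_reverse_string(binary_str: str) -> int:
--     zero_count = 0
--     one_count = 0
--     prev_is_zero = False
--     prev_is_one = False
--     for binary_char in binary_str:
--         if binary_char == '0' and not prev_is_zero:
--             zero_count += 1
--             prev_is_zero = True
--             prev_is_one = False
--         elif binary_char == '1' and not prev_is_one:
--             one_count += 1
--             prev_is_one = True
--             prev_is_zero = False
--
--     return min(zero_count, one_count)
-- ===== SOURCE B (Python) =====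
-- def f_reverse_string(binary_str: str) -> int:
--     # Closed form via alternation: runs of '0' and '1' strictly alternate, so
--     # min(#zero-runs, #one-runs) = floor(runs / 2), and runs = transitions + 1.
--     # So only count the transitions between adjacent binary digits.
--     bits = [c for c in binary_str if c in '01']
--     if not bits:
--         return 0
--     transitions = sum(1 for a, b in zip(bits, bits[1:]) if a != b)
--     return (transitions + 1) // 2
-- ===== Notes on version B (the rewrite author's own statement) =====
-- stated objective: alternative
-- what changed: Replaces A's two-counter/two-flag run-counting state machine by a closed form: count only the transitions t between adjacent binary digits and return (t+1)//2, using the alternation identity min(zero_runs, one_runs) = floor(runs/2) with runs = t+1.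
import Mathlib
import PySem

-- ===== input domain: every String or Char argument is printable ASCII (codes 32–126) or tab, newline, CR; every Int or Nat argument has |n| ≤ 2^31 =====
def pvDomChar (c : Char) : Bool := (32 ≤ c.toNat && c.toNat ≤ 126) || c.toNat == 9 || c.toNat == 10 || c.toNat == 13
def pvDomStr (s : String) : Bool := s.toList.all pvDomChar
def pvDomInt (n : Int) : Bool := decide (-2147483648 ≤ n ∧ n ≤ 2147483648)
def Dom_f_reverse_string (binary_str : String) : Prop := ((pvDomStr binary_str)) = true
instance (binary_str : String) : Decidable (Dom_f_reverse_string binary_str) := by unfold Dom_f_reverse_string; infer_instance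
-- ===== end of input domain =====

-- B replaces A's run-counting state machine by a closed form: count transitions t between
-- adjacent binary digits and return (t+1)//2 (alternative decomposition, same cost).

-- ===== PORT A =====
-- A's loop body, one step of the two-flag state machine
def pvStepA (st : Int × Int × Bool × Bool) (binary_char : Char) : Int × Int × Bool × Bool :=
  let (zc, oc, pz, po) := st
  if binary_char = '0' ∧ pz = false then (zc + 1, oc, true, false)
  else if binary_char = '1' ∧ po = false then (zc, oc + 1, false, true)
  else (zc, oc, pz, po)

def f_reverse_string (binary_str : String) : Int :=
  let st := binary_str.toList.foldl pvStepA (0, 0, false, false)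
  min st.1 st.2.1

-- ===== PORT B =====
def f_reverse_string_alt (binary_str : String) : Int :=
  let bits := binary_str.toList.filter (fun c => c = '0' ∨ c = '1')
  if bits = [] then 0
  else
    let transitions :=
      (bits.zip bits.tail).foldl (fun acc p => if p.1 ≠ p.2 then acc + 1 else acc) (0 : Int)
    PySem.Int.floordiv (transitions + 1) 2

-- ===== PRECONDITION & SPEC =====
def Spec_f_reverse_string (binary_str : String) (out : Int) : Prop := out = f_reverse_string_alt binary_str
instance (binary_str : String) (out : Int) : Decidable (Spec_f_reverse_string binary_str out) := by unfold Spec_f_reverse_string; infer_instance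

-- ===== CLAIM (what is proved, stated in full; the proofs are below) =====
def Claim_equal_f_reverse_string : Prop := ∀ (binary_str : String), Dom_f_reverse_string binary_str → Spec_f_reverse_string binary_str (f_reverse_string binary_str)

-- ===== LEMMAS AND PROOFS =====

-- run keys of the '0'/'1' subsequence of a list, given the last binary char seen so far
def pvKeys : Option Char → List Char → List Char
  | _, [] => []
  | last, c :: t =>
    if c = '0' ∨ c = '1' then
      (if some c = last then pvKeys last t else c :: pvKeys (some c) t)
    else pvKeys last t

-- the last binary char of l, defaulting to `last`
def pvLast : Option Char → List Char → Option Char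
  | last, [] => last
  | last, c :: t => if c = '0' ∨ c = '1' then pvLast (some c) t else pvLast last t

def pvFlags (last : Option Char) : Bool × Bool := (last == some '0', last == some '1')

-- number of transitions between adjacent elements
def pvTrans : List Char → Nat
  | [] => 0
  | [_] => 0
  | a :: b :: t => (if a = b then 0 else 1) + pvTrans (b :: t)

theorem pvA_fold (l : List Char) : ∀ (zc oc : Int) (last : Option Char),
    l.foldl pvStepA (zc, oc, pvFlags last) =
      (zc + ((pvKeys last l).count '0' : Int), oc + ((pvKeys last l).count '1' : Int),
       pvFlags (pvLast last l)) := by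
  induction l with
  | nil => intro zc oc last; simp [pvKeys, pvLast]
  | cons c t ih =>
    intro zc oc last
    by_cases hb : c = '0' ∨ c = '1'
    · rcases hb with h | h <;> subst h
      · by_cases hl : last = some '0'
        · subst hl
          have hstep : pvStepA (zc, oc, pvFlags (some '0')) '0' = (zc, oc, pvFlags (some '0')) := by
            simp [pvStepA, pvFlags]
          simp only [List.foldl_cons, hstep, ih, pvKeys, pvLast]
          simp [pvFlags]
        · have hstep : pvStepA (zc, oc, pvFlags last) '0' = (zc + 1, oc, pvFlags (some '0')) := by
            simp [pvStepA, pvFlags]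
            exact fun h => hl h
          simp only [List.foldl_cons, hstep, ih, pvKeys, pvLast]
          have : ¬ (some '0' = last) := fun h => hl h.symm
          simp [this]
          ring
      · by_cases hl : last = some '1'
        · subst hl
          have hstep : pvStepA (zc, oc, pvFlags (some '1')) '1' = (zc, oc, pvFlags (some '1')) := by
            simp [pvStepA, pvFlags]
          simp only [List.foldl_cons, hstep, ih, pvKeys, pvLast]
          simp [pvFlags]
        · have hstep : pvStepA (zc, oc, pvFlags last) '1' = (zc, oc + 1, pvFlags (some '1')) := by
            simp [pvStepA, pvFlags]
            exact fun h => hl h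
          simp only [List.foldl_cons, hstep, ih, pvKeys, pvLast]
          have : ¬ (some '1' = last) := fun h => hl h.symm
          simp [this]
          ring
    · simp only [not_or] at hb
      have hstep : pvStepA (zc, oc, pvFlags last) c = (zc, oc, pvFlags last) := by
        simp [pvStepA, hb.1, hb.2]
      simp only [List.foldl_cons, hstep, ih, pvKeys, pvLast]
      simp [hb.1, hb.2]

-- pvKeys only looks at '0'/'1' characters
theorem pvKeys_filter (l : List Char) : ∀ last,
    pvKeys last (l.filter (fun c => decide (c = '0' ∨ c = '1'))) = pvKeys last l := by
  induction l with
  | nil => intro last; simp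
  | cons c t ih =>
    intro last
    by_cases hb : c = '0' ∨ c = '1'
    · simp only [List.filter_cons, decide_eq_true hb, if_true, pvKeys, if_pos hb]
      split <;> rw [ih]
    · simp only [List.filter_cons, pvKeys, if_neg hb]
      simp only [decide_eq_false hb, Bool.false_eq_true, if_false]
      exact ih last

-- every run key is a binary digit
theorem pvKeys_mem : ∀ (l : List Char) (last : Option Char) (c : Char),
    c ∈ pvKeys last l → c = '0' ∨ c = '1' := by
  intro l
  induction l with
  | nil => intro last c hc; simp [pvKeys] at hc
  | cons a t ih =>
    intro last c hc
    by_cases hb : a = '0' ∨ a = '1'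
    · simp only [pvKeys, if_pos hb] at hc
      by_cases hl : some a = last
      · rw [if_pos hl] at hc; exact ih last c hc
      · rw [if_neg hl] at hc
        rcases List.mem_cons.mp hc with h | h
        · subst h; exact hb
        · exact ih (some a) c h
    · simp only [pvKeys, if_neg hb] at hc
      exact ih last c hc

-- the run keys alternate, even when prefixed by the last char seen
theorem pvKeys_chain_cons : ∀ (l : List Char) (b : Char),
    List.IsChain (· ≠ ·) (b :: pvKeys (some b) l) := by
  intro l
  induction l with
  | nil => intro b; exact List.IsChain.singleton b
  | cons a t ih =>
    intro b
    by_cases hb : a = '0' ∨ a = '1'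
    · simp only [pvKeys, if_pos hb]
      by_cases hl : some a = some b
      · rw [if_pos hl]; exact ih b
      · rw [if_neg hl]
        have hab : b ≠ a := fun h => hl (by rw [h])
        exact List.isChain_cons_cons.mpr ⟨hab, ih a⟩
    · simp only [pvKeys, if_neg hb]; exact ih b

theorem pvKeys_chain_none : ∀ (l : List Char), List.IsChain (· ≠ ·) (pvKeys none l) := by
  intro l
  induction l with
  | nil => exact List.IsChain.nil
  | cons a t ih =>
    by_cases hb : a = '0' ∨ a = '1'
    · simp only [pvKeys, if_pos hb, reduceCtorEq, if_false]
      exact pvKeys_chain_cons t a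
    · simp only [pvKeys, if_neg hb]; exact ih

-- on an all-binary list, the number of run keys from last = some b is the number of transitions in b::l
theorem pvKeys_len : ∀ (l : List Char) (b : Char), (∀ c ∈ l, c = '0' ∨ c = '1') →
    (pvKeys (some b) l).length = pvTrans (b :: l) := by
  intro l
  induction l with
  | nil => intro b _; simp [pvKeys, pvTrans]
  | cons a t ih =>
    intro b hall
    have hb : a = '0' ∨ a = '1' := hall a (List.mem_cons_self ..)
    have hall' : ∀ c ∈ t, c = '0' ∨ c = '1' := fun x hx => hall x (List.mem_cons_of_mem _ hx)
    by_cases hab : a = b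
    · subst hab
      simp only [pvKeys, if_pos hb, pvTrans, if_pos rfl]
      simpa using ih a hall'
    · have hl : ¬ (some a = some b) := fun h => hab (Option.some.inj h)
      simp only [pvKeys, if_pos hb, if_neg hl, List.length_cons, pvTrans]
      rw [ih a hall']
      have hba : ¬ (b = a) := fun h => hab h.symm
      simp [hba]
      omega

-- an alternating binary list has min(count '0', count '1') = length / 2
theorem pvAltMin : ∀ (n : Nat) (k : List Char), k.length = n →
    (∀ c ∈ k, c = '0' ∨ c = '1') → List.IsChain (· ≠ ·) k →
    min (k.count '0') (k.count '1') = k.length / 2 := by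
  intro n
  induction n using Nat.strong_induction_on with
  | _ n ih =>
    intro k hlen hbin hch
    match k, hlen with
    | [], _ => simp
    | [a], _ =>
      rcases hbin a (List.mem_cons_self ..) with h | h <;> subst h <;> decide
    | a :: b :: t, hlen =>
      have hab : a ≠ b := List.rel_of_isChain_cons_cons hch
      have hcht : List.IsChain (· ≠ ·) t := (List.isChain_cons_cons.mp hch).2.tail
      have hbt : ∀ c ∈ t, c = '0' ∨ c = '1' := fun x hx =>
        hbin x (List.mem_cons_of_mem _ (List.mem_cons_of_mem _ hx))
      have ha := hbin a (List.mem_cons_self ..)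
      have hb := hbin b (List.mem_cons_of_mem _ (List.mem_cons_self ..))
      have hone : (a = '0' ∧ b = '1') ∨ (a = '1' ∧ b = '0') := by
        rcases ha with h | h <;> rcases hb with h' | h' <;> simp_all
      have iht := ih t.length (by simp only [List.length_cons] at hlen; omega) t rfl hbt hcht
      have h0 : (a :: b :: t).count '0' = t.count '0' + 1 := by
        rcases hone with ⟨h, h'⟩ | ⟨h, h'⟩ <;> subst h <;> subst h' <;> simp
      have h1 : (a :: b :: t).count '1' = t.count '1' + 1 := by
        rcases hone with ⟨h, h'⟩ | ⟨h, h'⟩ <;> subst h <;> subst h' <;> simp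
      rw [h0, h1]
      simp only [List.length_cons]
      omega

-- B's transition-counting fold equals pvTrans
theorem pvZipTrans : ∀ (l : List Char) (a : Char),
    (((a :: l).zip l).countP fun p => decide ¬ (p.1 = p.2)) = pvTrans (a :: l) := by
  intro l
  induction l with
  | nil => intro a; simp [pvTrans]
  | cons b t ih =>
    intro a
    simp only [List.zip_cons_cons, List.countP_cons, pvTrans, ih b]
    by_cases h : a = b <;> simp [h] <;> omega

theorem f_reverse_string_spec : Claim_equal_f_reverse_string := by
  intro s _
  unfold Spec_f_reverse_string f_reverse_string f_reverse_string_alt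
  have hA := pvA_fold s.toList 0 0 none
  have hF := pvKeys_filter s.toList none
  simp only [Bool.decide_or] at hF
  simp only [show ((0 : Int), (0 : Int), false, false) = ((0 : Int), (0 : Int), pvFlags none)
      from rfl]
  rw [hA]
  simp only [Bool.decide_or, zero_add, ← hF]
  rcases hcase : s.toList.filter (fun c => decide (c = '0') || decide (c = '1')) with _ | ⟨a, t⟩
  · simp [pvKeys]
  · have hall : ∀ c ∈ a :: t, c = '0' ∨ c = '1' := by
      intro c hc
      have : c ∈ s.toList.filter (fun c => decide (c = '0') || decide (c = '1')) := by
        rw [hcase]; exact hc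
      simpa using List.of_mem_filter this
    have ha : a = '0' ∨ a = '1' := hall a (List.mem_cons_self ..)
    have ht : ∀ c ∈ t, c = '0' ∨ c = '1' := fun x hx => hall x (List.mem_cons_of_mem _ hx)
    have hk : pvKeys none (a :: t) = a :: pvKeys (some a) t := by
      simp [pvKeys, ha]
    have hmin := pvAltMin (pvKeys none (a :: t)).length _ rfl
      (fun c hc => pvKeys_mem _ _ c hc) (pvKeys_chain_none _)
    have hklen : (pvKeys none (a :: t)).length = pvTrans (a :: t) + 1 := by
      rw [hk, List.length_cons, pvKeys_len t a ht]
    have hfold : ((a :: t).zip (a :: t).tail).foldl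
        (fun acc p => if p.1 ≠ p.2 then acc + 1 else acc) (0 : Int)
        = (pvTrans (a :: t) : Int) := by
      rw [List.tail_cons, PySem.List.foldl_ite_add_one, ← pvZipTrans t a]
      simp
    simp only [reduceCtorEq, if_false, hfold]
    rw [show min ((pvKeys none (a :: t)).count '0' : Int) ((pvKeys none (a :: t)).count '1' : Int)
        = ((min ((pvKeys none (a :: t)).count '0') ((pvKeys none (a :: t)).count '1') : Nat) : Int)
      from (Nat.cast_min ..).symm, hmin, hklen]
    rw [show ((pvTrans (a :: t) : Int) + 1) = (((pvTrans (a :: t) + 1 : Nat)) : Int) by push_cast; ring]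
    rw [PySem.Int.floordiv_eq_ediv_of_pos (by omega : (0:Int) < 2)]
    simp
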